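-- pv_equiv track=rewrite | github.com/ruiguo-bio/score_transformer | generation.py | get_mask_track_name
-- ===== SOURCE A (Python) =====
-- def get_mask_track_name(mask_tracks,mask_idx):
--     total_tracks = 0
--     for one_bar_tracks in mask_tracks:
--         for track in one_bar_tracks:
--             if total_tracks == mask_idx:
--                 if track == 0:
--                     #tensile
--                     return 's_'
--                 if track == 1:
--                     #diameter
--                     return 'a_'
--                 return f'track_{track-2}'
--             else:
--                 total_tracks += 1
-- ===== SOURCE B (Python) =====
-- def get_mask_track_name(mask_tracks, mask_idx):
--     flat = [t for bar in mask_tracks for t in bar]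
--     if 0 <= mask_idx < len(flat):
--         track = flat[mask_idx]
--         if track == 0:
--             return 's_'
--         if track == 1:
--             return 'a_'
--         return f'track_{track-2}'
--     return None
-- ===== Notes on version B (the rewrite author's own statement) =====
-- stated objective: simpler
-- what changed: Replaces the nested counting scan with an early return by a flatten-then-bounded-index lookup: build the flat track list once, then map flat[mask_idx] to its name if the index is in range.
import Mathlib
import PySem

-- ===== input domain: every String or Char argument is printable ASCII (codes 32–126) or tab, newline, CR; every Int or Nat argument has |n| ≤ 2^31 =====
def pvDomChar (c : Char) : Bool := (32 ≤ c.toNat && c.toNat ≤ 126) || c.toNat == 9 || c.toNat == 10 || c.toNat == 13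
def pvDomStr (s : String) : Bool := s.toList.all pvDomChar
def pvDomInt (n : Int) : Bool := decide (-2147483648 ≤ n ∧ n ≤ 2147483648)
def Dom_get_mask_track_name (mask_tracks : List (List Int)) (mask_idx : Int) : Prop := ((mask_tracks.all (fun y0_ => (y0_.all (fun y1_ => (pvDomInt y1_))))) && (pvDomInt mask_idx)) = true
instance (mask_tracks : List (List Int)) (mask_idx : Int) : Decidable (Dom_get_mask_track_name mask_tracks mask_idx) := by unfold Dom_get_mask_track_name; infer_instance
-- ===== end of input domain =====

-- B replaces A's nested counting scan (early return when the counter hits mask_idx) by a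
-- flatten-then-bounded-index lookup; objective: simpler. Same return value everywhere; no mutation.

-- ===== PORT A =====
-- inner loop over one bar: either returns the name (.inl) or the updated counter (.inr)
def pvA_inner (bar : List Int) (mask_idx : Int) (total : Int) : String ⊕ Int :=
  match bar with
  | [] => .inr total
  | track :: rest =>
    if total == mask_idx then
      if track == 0 then .inl "s_"
      else if track == 1 then .inl "a_"
      else .inl ("track_" ++ PySem.Int.toStr (track - 2))
    else pvA_inner rest mask_idx (total + 1)

def pvA_outer (bars : List (List Int)) (mask_idx : Int) (total : Int) : Option String :=
  match bars with
  | [] => none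
  | bar :: rest =>
    match pvA_inner bar mask_idx total with
    | .inl s => some s
    | .inr total' => pvA_outer rest mask_idx total'

def get_mask_track_name (mask_tracks : List (List Int)) (mask_idx : Int) : Option String :=
  pvA_outer mask_tracks mask_idx 0

-- ===== PORT B =====
def get_mask_track_name_alt (mask_tracks : List (List Int)) (mask_idx : Int) : Option String :=
  let flat := mask_tracks.flatten
  if 0 ≤ mask_idx ∧ mask_idx < flat.length then
    match PySem.List.pyGet? flat mask_idx with
    | some track =>
      if track == 0 then some "s_"
      else if track == 1 then some "a_"
      else some ("track_" ++ PySem.Int.toStr (track - 2))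
    | none => none
  else none

-- ===== PRECONDITION & SPEC =====
def Spec_get_mask_track_name (mask_tracks : List (List Int)) (mask_idx : Int) (out : Option String) : Prop := out = get_mask_track_name_alt mask_tracks mask_idx
instance (mask_tracks : List (List Int)) (mask_idx : Int) (out : Option String) : Decidable (Spec_get_mask_track_name mask_tracks mask_idx out) := by unfold Spec_get_mask_track_name; infer_instance

-- ===== CLAIM (what is proved, stated in full; the proofs are below) =====
def Claim_equal_get_mask_track_name : Prop := ∀ (mask_tracks : List (List Int)) (mask_idx : Int), Dom_get_mask_track_name mask_tracks mask_idx → Spec_get_mask_track_name mask_tracks mask_idx (get_mask_track_name mask_tracks mask_idx)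

-- ===== LEMMAS AND PROOFS =====
def pvName (t : Int) : String :=
  if t == 0 then "s_" else if t == 1 then "a_" else "track_" ++ PySem.Int.toStr (t - 2)

theorem pvA_inner_eq (bar : List Int) (idx total : Int) :
    pvA_inner bar idx total =
      if total ≤ idx ∧ idx < total + bar.length then .inl (pvName (bar.getD (idx - total).toNat 0))
      else .inr (total + bar.length) := by
  induction bar generalizing total with
  | nil => simp [pvA_inner]
  | cons t rest ih =>
    simp only [pvA_inner]
    by_cases h : total = idx
    · subst h
      have : (total ≤ total ∧ total < total + (t :: rest).length) :=
        ⟨by omega, by simp⟩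
      rw [if_pos this]
      have h0 : (total - total).toNat = 0 := by omega
      simp only [beq_self_eq_true, if_true, pvName, h0, List.getD_cons_zero]
      split_ifs <;> rfl
    · have hne : (total == idx) = false := by simp [h]
      rw [hne]
      simp only [Bool.false_eq_true, if_false]
      rw [ih (total + 1)]
      have hcond : (total + 1 ≤ idx ∧ idx < total + 1 + rest.length) ↔
          (total ≤ idx ∧ idx < total + (t :: rest).length) := by
        simp
        omega
      by_cases hc : total + 1 ≤ idx ∧ idx < total + 1 + rest.length
      · have hc' := hcond.mp hc
        rw [if_pos hc, if_pos hc']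
        have hk : (idx - total).toNat = (idx - (total + 1)).toNat + 1 := by omega
        simp [hk]
      · have hc' : ¬ (total ≤ idx ∧ idx < total + (t :: rest).length) := fun h' => hc (hcond.mpr h')
        rw [if_neg hc, if_neg hc']
        simp; omega

theorem pvA_outer_eq (bars : List (List Int)) (idx total : Int) :
    pvA_outer bars idx total =
      if total ≤ idx ∧ idx < total + bars.flatten.length then
        some (pvName (bars.flatten.getD (idx - total).toNat 0))
      else none := by
  induction bars generalizing total with
  | nil => simp [pvA_outer]
  | cons bar rest ih =>
    have hlen : (bar :: rest).flatten.length = bar.length + rest.flatten.length := by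
      rw [List.flatten_cons, List.length_append]
    simp only [pvA_outer]
    rw [pvA_inner_eq]
    by_cases h1 : total ≤ idx ∧ idx < total + bar.length
    · rw [if_pos h1]
      have hcond : total ≤ idx ∧ idx < total + (bar :: rest).flatten.length := by
        rw [hlen]; push_cast; omega
      rw [if_pos hcond]
      have hk : (idx - total).toNat < bar.length := by omega
      simp [List.flatten_cons, List.getD, List.getElem?_append_left hk]
    · rw [if_neg h1]
      show pvA_outer rest idx (total + (bar.length : Int)) = _
      rw [ih]
      have hiff : (total + bar.length ≤ idx ∧ idx < total + bar.length + rest.flatten.length) ↔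
          (total ≤ idx ∧ idx < total + (bar :: rest).flatten.length) := by
        rw [hlen]; push_cast; omega
      by_cases h2 : total + bar.length ≤ idx ∧ idx < total + bar.length + rest.flatten.length
      · rw [if_pos h2, if_pos (hiff.mp h2)]
        have hk : (idx - total).toNat = bar.length + (idx - (total + bar.length)).toNat := by omega
        simp [List.flatten_cons, List.getD, hk, List.getElem?_append_right (by omega : bar.length ≤ bar.length + (idx - (total + (bar.length : Int))).toNat)]
      · rw [if_neg h2, if_neg (fun h' => h2 (hiff.mpr h'))]

-- ===== VERDICT (by name: the statement is the Claim_ definition above) =====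
theorem get_mask_track_name_spec : Claim_equal_get_mask_track_name := by
  intro mask_tracks mask_idx _
  unfold Spec_get_mask_track_name get_mask_track_name
  rw [pvA_outer_eq]
  simp only [get_mask_track_name_alt]
  by_cases h : 0 ≤ mask_idx ∧ mask_idx < (mask_tracks.flatten.length : Int)
  · have h' : (0 : Int) ≤ mask_idx ∧ mask_idx < 0 + mask_tracks.flatten.length := by
      omega
    rw [if_pos h', if_pos h]
    rw [PySem.List.pyGet?_of_nonneg _ h.1]
    have hk : mask_idx.toNat < mask_tracks.flatten.length := by omega
    simp [List.getElem?_eq_getElem hk, pvName, List.getD]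
    split_ifs <;> rfl
  · have h' : ¬ ((0 : Int) ≤ mask_idx ∧ mask_idx < 0 + mask_tracks.flatten.length) := by
      omega
    rw [if_neg h', if_neg h]
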